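-- pv_equiv track=rewrite | github.com/gnorm25/gjaignorm | 프로그래머스/1/155652. 둘만의 암호/둘만의 암호.py | solution
-- ===== SOURCE A (Python) =====
-- def solution(s, skip, index):
--     answer = ''
--     keys= 'abcdefghijklmnopqrstuvwxyz'*100
--     for x in s:
--         ori_dx= keys.index(x)
--         for y in range(index):
--             ori_dx+= 1
--             while keys[ori_dx] in skip:
--                 ori_dx+= 1
--         answer+= keys[ori_dx]
--
--
--     return answer
-- ===== SOURCE B (Python) =====
-- def solution(s, skip, index):
--     alphabet = 'abcdefghijklmnopqrstuvwxyz'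
--     valid = [c for c in alphabet if c not in skip]
--     n = len(valid)
--     out = []
--     for x in s:
--         p = alphabet.index(x)
--         if index > 0 and n:
--             r = len([c for c in alphabet[:p + 1] if c not in skip])
--             out.append(valid[(r + index - 1) % n])
--         else:
--             out.append(x)
--     return ''.join(out)
-- ===== Notes on version B (the rewrite author's own statement) =====
-- stated objective: faster
-- what changed: A walks the 2600-character key string one position at a time for each of the index iterations per character; B computes each output letter in closed form as valid[(rank + index - 1) % len(valid)] from the list of non-skip letters, with no stepping loop.
import Mathlib
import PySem

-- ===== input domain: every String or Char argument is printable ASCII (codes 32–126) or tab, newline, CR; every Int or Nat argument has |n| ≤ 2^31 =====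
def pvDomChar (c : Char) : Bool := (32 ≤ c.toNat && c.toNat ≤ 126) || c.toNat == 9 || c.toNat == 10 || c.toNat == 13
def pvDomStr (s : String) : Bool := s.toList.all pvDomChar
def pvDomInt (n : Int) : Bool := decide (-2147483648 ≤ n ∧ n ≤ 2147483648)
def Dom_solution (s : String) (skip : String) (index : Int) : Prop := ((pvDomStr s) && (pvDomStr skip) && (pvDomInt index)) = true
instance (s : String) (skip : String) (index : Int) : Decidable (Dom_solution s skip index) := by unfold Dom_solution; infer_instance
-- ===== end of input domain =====

-- B replaces A's per-character step-by-step walk along the 2600-character key string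
-- (index iterations, each skipping skip-letters one position at a time) by a closed-form
-- modular-rank computation over the 26-letter alphabet; objective: faster.

-- ===== PORT A =====

-- 'abcdefghijklmnopqrstuvwxyz' (as its list of characters)
def pvAlpha : List Char := ['a','b','c','d','e','f','g','h','i','j','k','l','m','n','o','p','q','r','s','t','u','v','w','x','y','z']

-- 'abcdefghijklmnopqrstuvwxyz'*100
def pvKeys : List Char := (List.replicate 100 pvAlpha).flatten

-- `while keys[ori_dx] in skip: ori_dx += 1`; none = IndexError.  Fuel 2601 can never be
-- exhausted before the index check fails, since the index grows by 1 each pass and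
-- pvKeys has 2600 entries.  `c in skip` for the single char c is char membership (exact).
def pvSkipWhile (sk : List Char) (i : Nat) : Nat → Option Nat
  | 0 => none
  | fuel+1 =>
    match pvKeys[i]? with
    | none => none
    | some c => if sk.contains c then pvSkipWhile sk (i+1) fuel else some i

-- one iteration of `for y in range(index)`: ori_dx += 1 then the while loop
def pvStep (sk : List Char) (o : Option Nat) : Option Nat :=
  match o with
  | none => none
  | some i => pvSkipWhile sk (i+1) 2601

-- body of A's outer loop for one character x: keys.index(x), the inner for-loop, keys[ori_dx]
def pvEncChar (sk : List Char) (index : Int) (x : Char) : Option Char :=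
  match PySem.List.index? pvKeys x with
  | none => none                                   -- ValueError from keys.index(x)
  | some p =>
    match (List.range index.toNat).foldl (fun acc _ => pvStep sk acc) (some p) with
    | none => none                                 -- IndexError from keys[ori_dx]
    | some q => pvKeys[q]?

def solution (s : String) (skip : String) (index : Int) : String :=
  let r := s.toList.foldl (fun acc x =>
    match acc, pvEncChar skip.toList index x with
    | some l, some c => some (l ++ [c])
    | _, _ => none) (some ([] : List Char))
  match r with
  | some l => String.ofList l
  | none => ""                                     -- unreachable under Pre_solution

-- ===== PORT B =====

-- B's own copy of the alphabet literal (B's Python defines its own `alphabet` string)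
def pvAlphaB : List Char := ['a','b','c','d','e','f','g','h','i','j','k','l','m','n','o','p','q','r','s','t','u','v','w','x','y','z']

def solution_alt (s : String) (skip : String) (index : Int) : String :=
  let sk := skip.toList
  let valid := pvAlphaB.filter (fun c => !sk.contains c)
  let n := valid.length
  let out := s.toList.foldl (fun (acc : Option (List Char)) x =>
    match acc with
    | none => none
    | some l =>
      match PySem.List.index? pvAlphaB x with
      | none => none                               -- ValueError from alphabet.index(x)
      | some p =>
        if 0 < index ∧ n ≠ 0 then
          let r := ((pvAlphaB.take (p+1)).filter (fun c => !sk.contains c)).length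
          some (l ++ [valid.getD (PySem.Int.mod ((r : Int) + index - 1) (n : Int)).toNat ' '])
        else some (l ++ [x])) (some ([] : List Char))
  match out with
  | some l => String.ofList l
  | none => ""                                     -- unreachable under Pre_solution

-- ===== PRECONDITION & SPEC =====

-- the alphabet literal as the precondition describes it (independent of both ports)
def pvAlphaPre : List Char := ['a','b','c','d','e','f','g','h','i','j','k','l','m','n','o','p','q','r','s','t','u','v','w','x','y','z']

-- Pre_ excludes exactly the inputs on which A raises: a character of s outside 'a'..'z'
-- (ValueError from keys.index) and shifts that walk past the 2600-character key string
-- (IndexError): for a character at alphabet position p with r non-skip letters at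
-- positions 0..p, A's walk ends at the (r+index)-th valid position of keys, which
-- exists iff r + index ≤ 100 * (number of letters not in skip).  (On the excluded
-- all-lowercase overrun inputs A raises IndexError while B returns a wrapped string.)
def Pre_solution (s : String) (skip : String) (index : Int) : Prop :=
  (s.toList.all (fun x => decide ('a' ≤ x ∧ x ≤ 'z') &&
    (decide (index ≤ 0) ||
     decide (((pvAlphaPre.take (x.toNat - 96)).filter (fun c => !skip.toList.contains c)).length + index.toNat
        ≤ 100 * (pvAlphaPre.filter (fun c => !skip.toList.contains c)).length)))) = true

instance (s : String) (skip : String) (index : Int) : Decidable (Pre_solution s skip index) := by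
  unfold Pre_solution; infer_instance

def pvWitness_solution : String × String × Int := ("hello", "lo", 30)

def Spec_solution (s : String) (skip : String) (index : Int) (out : String) : Prop :=
  out = solution_alt s skip index

instance (s : String) (skip : String) (index : Int) (out : String) : Decidable (Spec_solution s skip index out) := by
  unfold Spec_solution; infer_instance

-- ===== CLAIM =====

def Claim_equal_solution : Prop := ∀ (s : String) (skip : String) (index : Int),
  Dom_solution s skip index → Pre_solution s skip index → Spec_solution s skip index (solution s skip index)

-- ===== LEMMAS AND PROOFS =====

-- validity of key position j: the letter of keys at position j is not in skip
def pvP (sk : List Char) (j : Nat) : Bool := !sk.contains (pvAlpha.getD (j % 26) ' ')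

-- number of valid key positions below m
def pvCnt (sk : List Char) (m : Nat) : Nat := (List.range m).countP (pvP sk)

-- number of valid letters among the first t alphabet letters
def pvCntA (sk : List Char) (t : Nat) : Nat := (pvAlpha.take t).countP (fun c => !sk.contains c)

-- number of valid letters
def pvN (sk : List Char) : Nat := pvAlpha.countP (fun c => !sk.contains c)

theorem pvAlpha_length : pvAlpha.length = 26 := by decide

theorem index?_alpha : ∀ x ∈ pvAlpha, PySem.List.index? pvAlpha x = some (x.toNat - 97) := by
  intro x hx; fin_cases hx <;> decide

theorem getD_alpha : ∀ x ∈ pvAlpha, pvAlpha.getD (x.toNat - 97) ' ' = x := by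
  intro x hx; fin_cases hx <;> decide

theorem toNat_alpha_lt : ∀ x ∈ pvAlpha, 97 ≤ x.toNat ∧ x.toNat ≤ 122 := by
  intro x hx; fin_cases hx <;> decide

theorem mem_alpha (x : Char) (h1 : 'a' ≤ x) (h2 : x ≤ 'z') : x ∈ pvAlpha := by
  have h97 : 97 ≤ x.toNat := h1
  have h122 : x.toNat ≤ 122 := h2
  have he : x = Char.ofNat x.toNat := (Char.ofNat_toNat x).symm
  interval_cases h : x.toNat <;> rw [he] <;> decide

theorem keys_split : pvKeys = pvAlpha ++ (List.replicate 99 pvAlpha).flatten := rfl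

theorem index?_keys (x : Char) (h1 : 'a' ≤ x) (h2 : x ≤ 'z') :
    PySem.List.index? pvKeys x = some (x.toNat - 97) := by
  rw [keys_split, PySem.List.index?_append_of_mem _ (mem_alpha x h1 h2)]
  exact index?_alpha x (mem_alpha x h1 h2)

theorem flat_rep_get : ∀ (a : Nat) (j : Nat), j < 26 * a →
    ((List.replicate a pvAlpha).flatten)[j]? = some (pvAlpha.getD (j % 26) ' ') := by
  intro a
  induction a with
  | zero => intro j hj; omega
  | succ a ih =>
    intro j hj
    rw [List.replicate_succ, List.flatten_cons]
    by_cases hlt : j < 26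
    · have hlen : j < pvAlpha.length := by rw [pvAlpha_length]; exact hlt
      rw [List.getElem?_append_left hlen, Nat.mod_eq_of_lt hlt]
      simp [List.getElem?_eq_getElem hlen]
    · rw [List.getElem?_append_right (by rw [pvAlpha_length]; omega)]
      rw [pvAlpha_length]
      have h1 : j - 26 < 26 * a := by omega
      rw [ih (j - 26) h1]
      congr 2
      omega

theorem keys_get (j : Nat) (h : j < 2600) :
    pvKeys[j]? = some (pvAlpha.getD (j % 26) ' ') := by
  exact flat_rep_get 100 j (by omega)

theorem cnt_succ (sk : List Char) (t : Nat) :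
    pvCnt sk (t+1) = pvCnt sk t + (if pvP sk t then 1 else 0) := by
  by_cases h : pvP sk t <;>
    simp [pvCnt, List.range_succ, List.countP_append, h]

theorem cnt_mono (sk : List Char) (a b : Nat) (h : a ≤ b) : pvCnt sk a ≤ pvCnt sk b := by
  induction b, h using Nat.le_induction with
  | base => exact le_rfl
  | succ b hab ih => rw [cnt_succ]; split <;> omega

theorem cnt_congr (sk : List Char) (a b : Nat) (h : a ≤ b)
    (hno : ∀ u, a ≤ u → u < b → pvP sk u = false) : pvCnt sk b = pvCnt sk a := by
  induction b, h using Nat.le_induction with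
  | base => rfl
  | succ b hab ih =>
    rw [cnt_succ, hno b hab (by omega)]
    simp [ih (fun u hu hub => hno u hu (by omega))]

theorem cnt_exists (sk : List Char) (a b : Nat) (h : pvCnt sk a < pvCnt sk b) :
    ∃ j, a ≤ j ∧ j < b ∧ pvP sk j = true := by
  by_contra hcon
  rcases le_or_gt a b with hab | hab
  · have : pvCnt sk b = pvCnt sk a := by
      apply cnt_congr sk a b hab
      intro u hu hub
      cases hval : pvP sk u with
      | false => rfl
      | true => exact absurd ⟨u, hu, hub, hval⟩ hcon
    omega
  · have := cnt_mono sk b a (by omega)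
    omega

-- countP over a range of getD-indices equals countP over the prefix
theorem countP_range_take {α : Type} (l : List α) (p : α → Bool) (d : α) :
    ∀ t, t ≤ l.length →
      (List.range t).countP (fun j => p (l.getD j d)) = (l.take t).countP p := by
  intro t
  induction t with
  | zero => intro _; simp
  | succ t ih =>
    intro ht
    rw [List.range_succ, List.countP_append, List.take_add_one, List.countP_append, ih (by omega)]
    have hlt : t < l.length := by omega
    simp [List.countP_cons, List.getElem?_eq_getElem hlt, List.getD]

theorem cnt_eq_cntA (sk : List Char) (t : Nat) (ht : t ≤ 26) :
    pvCnt sk t = pvCntA sk t := by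
  unfold pvCnt pvCntA
  rw [List.countP_congr (q := fun j => (!sk.contains (pvAlpha.getD j ' ')))
    (by intro j hj
        have : j < t := by simpa using hj
        simp [pvP, Nat.mod_eq_of_lt (by omega : j < 26)])]
  exact countP_range_take pvAlpha (fun c => !sk.contains c) ' ' t (by rw [pvAlpha_length]; exact ht)

theorem cnt_26 (sk : List Char) : pvCnt sk 26 = pvN sk := by
  rw [cnt_eq_cntA sk 26 le_rfl]
  unfold pvCntA pvN
  rw [← pvAlpha_length, List.take_length]

theorem P_period (sk : List Char) (m : Nat) : pvP sk (m + 26) = pvP sk m := by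
  simp [pvP, Nat.add_mod_right]

theorem cnt_period (sk : List Char) (m : Nat) :
    pvCnt sk (m + 26) = pvCnt sk m + pvN sk := by
  induction m with
  | zero => simpa [pvCnt] using cnt_26 sk
  | succ m ih =>
    have h1 : m + 1 + 26 = (m + 26) + 1 := by omega
    rw [h1, cnt_succ, P_period, ih, cnt_succ]
    split <;> omega

theorem cnt_cycle (sk : List Char) : ∀ (a t : Nat), pvCnt sk (26 * a + t) = pvN sk * a + pvCnt sk t := by
  intro a
  induction a with
  | zero => intro t; simp
  | succ a ih =>
    intro t
    have h1 : 26 * (a + 1) + t = (26 * a + t) + 26 := by ring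
    rw [h1, cnt_period, ih]
    ring

theorem cnt_2600 (sk : List Char) : pvCnt sk 2600 = 100 * pvN sk := by
  have := cnt_cycle sk 100 0
  simpa [pvCnt, Nat.mul_comm] using this

-- the while loop returns the least valid position ≥ i (when it is < 2600)
theorem sw_least (sk : List Char) : ∀ (fuel i j : Nat), i ≤ j → j < 2600 → pvP sk j = true →
    (∀ u, i ≤ u → u < j → pvP sk u = false) → j - i < fuel →
    pvSkipWhile sk i fuel = some j := by
  intro fuel
  induction fuel with
  | zero => intro i j _ _ _ _ h; omega
  | succ fuel ih =>
    intro i j hij hj hPj hno hfuel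
    rw [pvSkipWhile, keys_get i (by omega)]
    rcases Nat.lt_or_ge i j with hlt | hge
    · have hPi : pvP sk i = false := hno i le_rfl hlt
      have : sk.contains (pvAlpha.getD (i % 26) ' ') = true := by
        simpa [pvP] using hPi
      simp only [this, if_true]
      exact ih (i+1) j (by omega) hj hPj (fun u hu hub => hno u (by omega) hub) (by omega)
    · have hij' : i = j := by omega
      subst hij'
      have hc : sk.contains (pvAlpha.getD (i % 26) ' ') = false := by
        simpa [pvP] using hPj
      simp only [hc, Bool.false_eq_true, if_false]

theorem stepOnce (sk : List Char) (i : Nat) (h : pvCnt sk i < pvCnt sk 2600) :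
    ∃ j, i ≤ j ∧ j < 2600 ∧ pvP sk j = true ∧ pvSkipWhile sk i 2601 = some j ∧
      pvCnt sk (j+1) = pvCnt sk i + 1 := by
  obtain ⟨w, hwi, hw2600, hwP⟩ := cnt_exists sk i 2600 h
  have hex : ∃ j, i ≤ j ∧ pvP sk j = true := ⟨w, hwi, hwP⟩
  classical
  let j := Nat.find hex
  have hjspec : i ≤ j ∧ pvP sk j = true := Nat.find_spec hex
  have hjle : j ≤ w := Nat.find_le ⟨hwi, hwP⟩
  have hmin : ∀ u, i ≤ u → u < j → pvP sk u = false := by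
    intro u hu huj
    cases hval : pvP sk u with
    | false => rfl
    | true => exact absurd (And.intro hu hval) (Nat.find_min hex huj)
  refine ⟨j, hjspec.1, by omega, hjspec.2, ?_, ?_⟩
  · exact sw_least sk 2601 i j hjspec.1 (by omega) hjspec.2 hmin (by omega)
  · rw [cnt_succ, hjspec.2, cnt_congr sk i j hjspec.1 hmin]
    simp

-- invariant of A's inner for-loop
theorem loop_inv (sk : List Char) : ∀ (t p : Nat), p < 26 → 1 ≤ t →
    pvCnt sk (p+1) + t ≤ 100 * pvN sk →
    ∃ q, (List.range t).foldl (fun acc _ => pvStep sk acc) (some p) = some q ∧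
      pvP sk q = true ∧ pvCnt sk (q+1) = pvCnt sk (p+1) + t ∧ q < 2600 := by
  intro t
  induction t with
  | zero => intro p _ h; omega
  | succ t ih =>
    intro p hp ht hbound
    rcases Nat.eq_zero_or_pos t with ht0 | htpos
    · subst ht0
      have hlt : pvCnt sk (p+1) < pvCnt sk 2600 := by rw [cnt_2600]; omega
      obtain ⟨j, hij, hj26, hjP, hsw, hjcnt⟩ := stepOnce sk (p+1) hlt
      refine ⟨j, ?_, hjP, by omega, hj26⟩
      simp [List.range_succ, pvStep, hsw]
    · obtain ⟨q, hfold, hqP, hqcnt, hq26⟩ := ih p hp htpos (by omega)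
      have hlt : pvCnt sk (q+1) < pvCnt sk 2600 := by rw [cnt_2600]; omega
      obtain ⟨j, hij, hj26, hjP, hsw, hjcnt⟩ := stepOnce sk (q+1) hlt
      refine ⟨j, ?_, hjP, by omega, hj26⟩
      rw [List.range_succ, List.foldl_append, hfold]
      simpa [pvStep] using hsw

-- the element of the filtered list at the rank determined by the count
theorem filter_getD {α : Type} [DecidableEq α] (p : α → Bool) (d : α) :
    ∀ (l : List α) (o : Nat), o < l.length → p (l.getD o d) = true →
      (l.filter p).getD (((l.take (o+1)).countP p) - 1) d = l.getD o d := by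
  intro l
  induction l with
  | nil => intro o ho; simp at ho
  | cons c tl ih =>
    intro o ho hpo
    cases o with
    | zero =>
      have hpc : p c = true := by simpa [List.getD] using hpo
      simp [hpc, List.getD]
    | succ o =>
      have ho' : o < tl.length := by simpa using ho
      have hpo' : p (tl.getD o d) = true := by simpa [List.getD] using hpo
      have hgd : tl.getD o d = tl[o] := List.getD_eq_getElem tl d ho'
      have hmem : tl.getD o d ∈ tl.take (o+1) := by
        rw [hgd]; exact List.mem_take_iff_getElem.mpr ⟨o, by simp [ho'], rfl⟩
      have hsub : [tl.getD o d].Sublist (tl.take (o+1)) := List.singleton_sublist.mpr hmem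
      have hpos : 1 ≤ (tl.take (o+1)).countP p := by
        have hle := hsub.countP_le (p := p)
        have h1 : List.countP p [tl.getD o d] = 1 := by
          rw [List.countP_cons, List.countP_nil, hpo']; rfl
        omega
      rw [List.take_succ_cons, List.countP_cons]
      by_cases hpc : p c = true
      · rw [List.filter_cons_of_pos hpc]
        have harith : (tl.take (o+1)).countP p + (if p c then 1 else 0) - 1
            = ((tl.take (o+1)).countP p - 1) + 1 := by simp [hpc]; omega
        rw [harith, List.getD_cons_succ, List.getD_cons_succ]
        exact ih o ho' hpo'
      · rw [List.filter_cons_of_neg (by simpa using hpc)]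
        simp only [hpc]
        simpa [List.getD] using ih o ho' hpo'

theorem pvN_eq (sk : List Char) : pvN sk = (pvAlpha.filter (fun c => !sk.contains c)).length :=
  List.countP_eq_length_filter

theorem pvCntA_eq (sk : List Char) (t : Nat) :
    pvCntA sk t = ((pvAlpha.take t).filter (fun c => !sk.contains c)).length :=
  List.countP_eq_length_filter

theorem bridge (sk : List Char) (q m : Nat) (hq : pvP sk q = true)
    (hcnt : pvCnt sk (q+1) = m + 1) :
    pvAlpha.getD (q % 26) ' ' = (pvAlpha.filter (fun c => !sk.contains c)).getD (m % pvN sk) ' ' := by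
  set b := q % 26 with hb
  have hb26 : b < 26 := Nat.mod_lt _ (by omega)
  have hblen : b < pvAlpha.length := by rw [pvAlpha_length]; exact hb26
  have hdecomp : q + 1 = 26 * (q / 26) + (b + 1) := by omega
  have h1 : pvCnt sk (q+1) = pvN sk * (q / 26) + pvCnt sk (b+1) := by
    rw [hdecomp, cnt_cycle]
  have h2 : pvCnt sk (b+1) = pvCntA sk (b+1) := cnt_eq_cntA sk (b+1) (by omega)
  have hPb : (!sk.contains (pvAlpha.getD b ' ')) = true := hq
  have hmem : pvAlpha.getD b ' ' ∈ pvAlpha.take (b+1) := by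
    rw [List.getD_eq_getElem pvAlpha ' ' hblen]
    exact List.mem_take_iff_getElem.mpr ⟨b, by simp [hblen], rfl⟩
  have hge1 : 1 ≤ pvCntA sk (b+1) := by
    have hle := (List.singleton_sublist.mpr hmem).countP_le (p := fun c => !sk.contains c)
    have h1' : List.countP (fun c => !sk.contains c) [pvAlpha.getD b ' '] = 1 := by
      rw [List.countP_cons, List.countP_nil, hPb]; rfl
    unfold pvCntA
    omega
  have hlen : pvCntA sk (b+1) ≤ pvN sk :=
    (List.take_sublist (b+1) pvAlpha).countP_le (p := fun c => !sk.contains c)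
  have hi : m % pvN sk = pvCntA sk (b+1) - 1 := by
    have hm : m = (pvCntA sk (b+1) - 1) + pvN sk * (q / 26) := by omega
    rw [hm, Nat.add_mul_mod_self_left, Nat.mod_eq_of_lt (by omega)]
  rw [hi]
  unfold pvCntA
  exact (filter_getD (fun c => !sk.contains c) ' ' pvAlpha b hblen hPb).symm

-- the per-character computations of A and B agree
theorem encChar_eq (sk : List Char) (index : Int) (x : Char)
    (h1 : 'a' ≤ x) (h2 : x ≤ 'z')
    (h3 : index ≤ 0 ∨ pvCntA sk (x.toNat - 96) + index.toNat ≤ 100 * pvN sk) :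
    pvEncChar sk index x = some (
      if 0 < index ∧ (pvAlpha.filter (fun c => !sk.contains c)).length ≠ 0 then
        (pvAlpha.filter (fun c => !sk.contains c)).getD
          (PySem.Int.mod (((((pvAlpha.take ((x.toNat - 97)+1)).filter (fun c => !sk.contains c)).length : Nat) : Int) + index - 1)
            (((pvAlpha.filter (fun c => !sk.contains c)).length : Nat) : Int)).toNat ' '
      else x) := by
  have hxmem : x ∈ pvAlpha := mem_alpha x h1 h2
  have hxn := toNat_alpha_lt x hxmem
  have hp1 : x.toNat - 96 = (x.toNat - 97) + 1 := by omega
  have hp26 : x.toNat - 97 < 26 := by omega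
  unfold pvEncChar
  rw [index?_keys x h1 h2]
  rcases le_or_gt index 0 with hk | hk
  · have hk0 : index.toNat = 0 := Int.toNat_of_nonpos hk
    rw [hk0]
    have hcond : ¬(0 < index ∧ (pvAlpha.filter (fun c => !sk.contains c)).length ≠ 0) := by
      rintro ⟨hpos, -⟩; omega
    rw [if_neg hcond]
    simp only [List.range_zero, List.foldl_nil]
    simp only [keys_get (x.toNat - 97) (by omega : x.toNat - 97 < 2600)]
    rw [Nat.mod_eq_of_lt hp26, getD_alpha x hxmem]
  · have hk1 : 1 ≤ index.toNat := by omega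
    have hr : pvCnt sk ((x.toNat - 97)+1) = pvCntA sk ((x.toNat - 97)+1) :=
      cnt_eq_cntA sk _ (by omega)
    have hbound : pvCnt sk ((x.toNat - 97)+1) + index.toNat ≤ 100 * pvN sk := by
      rw [hr, ← hp1]; omega
    obtain ⟨q, hfold, hqP, hqcnt, hq26⟩ := loop_inv sk index.toNat (x.toNat - 97) hp26 hk1 hbound
    simp only [hfold, keys_get q hq26]
    have hn1 : 1 ≤ pvN sk := by
      rcases Nat.eq_zero_or_pos (pvN sk) with h0 | h; · omega
      · exact h
    have hcond : 0 < index ∧ (pvAlpha.filter (fun c => !sk.contains c)).length ≠ 0 := by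
      refine ⟨hk, ?_⟩
      rw [← pvN_eq]; omega
    rw [if_pos hcond]
    congr 1
    have hm : pvCnt sk (q+1) = (pvCntA sk ((x.toNat - 97)+1) + index.toNat - 1) + 1 := by
      rw [hqcnt, hr]; omega
    rw [bridge sk q (pvCntA sk ((x.toNat - 97)+1) + index.toNat - 1) hqP hm]
    congr 1
    have hc : ((((pvAlpha.take ((x.toNat - 97)+1)).filter (fun c => !sk.contains c)).length : Nat) : Int) + index - 1
        = (((pvCntA sk ((x.toNat - 97)+1) + index.toNat - 1 : Nat)) : Int) := by
      rw [pvCntA_eq]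
      have hidx : index = (index.toNat : Int) := (Int.toNat_of_nonneg (by omega)).symm
      rw [hidx]
      omega
    rw [hc, ← pvN_eq, PySem.Int.mod_natCast, Int.toNat_natCast]

-- the two whole-string folds agree, character by character
theorem folds_eq (sk : List Char) (index : Int) :
    ∀ (cs : List Char) (acc : List Char),
      (∀ x ∈ cs, ('a' ≤ x ∧ x ≤ 'z') ∧
        (index ≤ 0 ∨ pvCntA sk (x.toNat - 96) + index.toNat ≤ 100 * pvN sk)) →
      cs.foldl (fun acc x =>
          match acc, pvEncChar sk index x with
          | some l, some c => some (l ++ [c])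
          | _, _ => none) (some acc)
        = cs.foldl (fun (acc : Option (List Char)) x =>
            match acc with
            | none => none
            | some l =>
              match PySem.List.index? pvAlphaB x with
              | none => none
              | some p =>
                if 0 < index ∧ (pvAlphaB.filter (fun c => !sk.contains c)).length ≠ 0 then
                  some (l ++ [(pvAlphaB.filter (fun c => !sk.contains c)).getD
                    (PySem.Int.mod (((((pvAlphaB.take (p+1)).filter (fun c => !sk.contains c)).length : Nat) : Int) + index - 1)
                      (((pvAlphaB.filter (fun c => !sk.contains c)).length : Nat) : Int)).toNat ' '])
                else some (l ++ [x])) (some acc) := by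
  intro cs
  induction cs with
  | nil => intro acc _; rfl
  | cons x tl ih =>
    intro acc hall
    have hx := hall x (by simp)
    have hBA : pvAlphaB = pvAlpha := rfl
    simp only [hBA, List.foldl_cons, encChar_eq sk index x hx.1.1 hx.1.2 hx.2,
      index?_alpha x (mem_alpha x hx.1.1 hx.1.2)]
    rw [← apply_ite (fun y => (some (acc ++ [y]) : Option (List Char)))]
    exact ih _ (fun y hy => hall y (by simp [hy]))

theorem pre_translate (skip : String) (index : Int) (x : Char)
    (h : index ≤ 0 ∨
      ((pvAlpha.take (x.toNat - 96)).filter (fun c => !skip.toList.contains c)).length + index.toNat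
        ≤ 100 * (pvAlpha.filter (fun c => !skip.toList.contains c)).length) :
    index ≤ 0 ∨ pvCntA skip.toList (x.toNat - 96) + index.toNat ≤ 100 * pvN skip.toList := by
  rcases h with h | h
  · exact Or.inl h
  · right; rw [pvCntA_eq, pvN_eq]; exact h

theorem pre_iff (s skip : String) (index : Int) :
    Pre_solution s skip index ↔ ∀ x ∈ s.toList, ('a' ≤ x ∧ x ≤ 'z') ∧
      (index ≤ 0 ∨
        ((pvAlpha.take (x.toNat - 96)).filter (fun c => !skip.toList.contains c)).length + index.toNat
          ≤ 100 * (pvAlpha.filter (fun c => !skip.toList.contains c)).length) := by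
  have hPA : pvAlphaPre = pvAlpha := rfl
  unfold Pre_solution
  simp only [hPA, List.all_eq_true]
  simp

theorem solution_spec : Claim_equal_solution := by
  intro s skip index _ hpre0
  have hpre := (pre_iff s skip index).mp hpre0
  unfold Spec_solution solution solution_alt
  have h := folds_eq skip.toList index s.toList []
    (fun x hx => ⟨(hpre x hx).1, pre_translate skip index x (hpre x hx).2⟩)
  simp only []
  rw [h]
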